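-- pv_equiv track=rewrite | github.com/zmunk/adventofcode2023 | day2.py | check
-- ===== SOURCE A (Python) =====
-- def check(game):
--     for rnd in game:
--         for count, color in rnd:
--             if color == "red" and count > 12 \
--                     or color == "green" and count > 13 \
--                     or color == "blue" and count > 14:
--                 return False
--     return True
-- ===== SOURCE B (Python) =====
-- def check(game):
--     # aggregate: running maxima per color, then validate once at the end
--     r = g = b = 0
--     for rnd in game:
--         for count, color in rnd:
--             if color == "red":
--                 r = max(r, count)
--             elif color == "green":
--                 g = max(g, count)
--             elif color == "blue":
--                 b = max(b, count)
--     return r <= 12 and g <= 13 and b <= 14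
-- ===== Notes on version B (the rewrite author's own statement) =====
-- stated objective: alternative
-- what changed: A does a fused early-exit scan testing each pair against its color's limit; B first aggregates running per-color maxima over the whole game and then validates the three limits in one final check.
import Mathlib
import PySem

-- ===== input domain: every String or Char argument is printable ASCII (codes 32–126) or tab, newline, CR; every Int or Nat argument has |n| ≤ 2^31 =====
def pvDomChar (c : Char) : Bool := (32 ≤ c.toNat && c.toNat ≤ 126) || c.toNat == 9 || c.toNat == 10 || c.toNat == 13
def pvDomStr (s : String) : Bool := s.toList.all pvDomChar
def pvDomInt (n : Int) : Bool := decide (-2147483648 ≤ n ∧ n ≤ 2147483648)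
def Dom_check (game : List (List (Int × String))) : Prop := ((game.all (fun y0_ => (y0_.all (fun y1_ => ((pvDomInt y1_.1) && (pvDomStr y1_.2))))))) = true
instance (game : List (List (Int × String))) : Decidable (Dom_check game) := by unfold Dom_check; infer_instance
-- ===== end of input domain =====

-- B replaces A's fused early-exit limit test by aggregate-then-validate (per-color running maxima, one final check); alternative decomposition, same cost.

-- ===== PORT A =====
-- inner loop of A: scan a round's pairs, returning False on the first violating pair
def checkRnd : List (Int × String) → Bool
  | [] => true
  | (count, color) :: rest =>
      if (color == "red" && count > 12) || (color == "green" && count > 13)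
          || (color == "blue" && count > 14) then
        false
      else
        checkRnd rest

def check : List (List (Int × String)) → Bool
  | [] => true
  | rnd :: rest => if checkRnd rnd then check rest else false

-- ===== PORT B =====
-- one pair's update of the running maxima (r, g, b)
def stepPair (s : Int × Int × Int) (p : Int × String) : Int × Int × Int :=
  if p.2 == "red" then (max s.1 p.1, s.2.1, s.2.2)
  else if p.2 == "green" then (s.1, max s.2.1 p.1, s.2.2)
  else if p.2 == "blue" then (s.1, s.2.1, max s.2.2 p.1)
  else s

def check_alt (game : List (List (Int × String))) : Bool :=
  let s := game.foldl (fun s rnd => rnd.foldl stepPair s) (0, 0, 0)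
  decide (s.1 ≤ 12 ∧ s.2.1 ≤ 13 ∧ s.2.2 ≤ 14)

-- ===== PRECONDITION & SPEC =====
def Spec_check (game : List (List (Int × String))) (out : Bool) : Prop := out = check_alt game
instance (game : List (List (Int × String))) (out : Bool) : Decidable (Spec_check game out) := by unfold Spec_check; infer_instance

-- ===== CLAIM (what is proved, stated in full; the proofs are below) =====
def Claim_equal_check : Prop := ∀ (game : List (List (Int × String))), Dom_check game → Spec_check game (check game)

-- ===== LEMMAS AND PROOFS =====
def pvValid (s : Int × Int × Int) : Bool := decide (s.1 ≤ 12 ∧ s.2.1 ≤ 13 ∧ s.2.2 ≤ 14)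

theorem pvValid_step (s : Int × Int × Int) (p : Int × String) :
    pvValid (stepPair s p) =
      (pvValid s && !((p.2 == "red" && p.1 > 12) || (p.2 == "green" && p.1 > 13)
          || (p.2 == "blue" && p.1 > 14))) := by
  obtain ⟨r, g, b⟩ := s
  obtain ⟨c, col⟩ := p
  simp only [stepPair, pvValid]
  rw [Bool.eq_iff_iff]
  split_ifs with h1 h2 h3 <;> simp_all <;> omega

theorem pvValid_rnd (rnd : List (Int × String)) (s : Int × Int × Int) :
    pvValid (rnd.foldl stepPair s) = (pvValid s && checkRnd rnd) := by
  induction rnd generalizing s with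
  | nil => simp [checkRnd]
  | cons p rest ih =>
      obtain ⟨count, color⟩ := p
      simp only [List.foldl, checkRnd, ih, pvValid_step]
      split_ifs with h <;> simp [h]

theorem pvValid_game (game : List (List (Int × String))) (s : Int × Int × Int) :
    pvValid (game.foldl (fun s rnd => rnd.foldl stepPair s) s) = (pvValid s && check game) := by
  induction game generalizing s with
  | nil => simp [check]
  | cons rnd rest ih =>
      simp only [List.foldl, check, ih, pvValid_rnd]
      split_ifs with h <;> simp [h]

-- ===== VERDICT (by name: the statement is the Claim_ definition above) =====
theorem check_spec : Claim_equal_check := by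
  intro game _
  show check game = check_alt game
  have h := pvValid_game game (0, 0, 0)
  simpa [check_alt, pvValid] using h.symm
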